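-- pv_equiv track=rewrite | github.com/google/cloud-forensics-utils | libcloudforensics/providers/gcp/internal/monitoring.py | _BuildUsageFilter
-- ===== SOURCE A (Python) =====
-- from typing import TYPE_CHECKING, Dict, List, Optional, Any
--
-- def _BuildUsageFilter(
--     metric_type: str, instance_ids: Optional[List[str]]) -> str:
--   """Builds a metrics query filter based on a list of instance IDs.
--
--   Args:
--     metric_type str: the type of metric to filter on.
--     instance_ids list[str]: a list of instance ids.
--
--   Returns:
--     str: the filter to use in a metrics query.
--   """
--   instances_filter = (
--         ['metric.type = "{0:s}"'.format(metric_type)])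
--   if instance_ids:
--     instances_filter.append(
--         ' AND (resource.label.instance_id = "{0:s}"'.format(instance_ids[0]))
--     if len(instance_ids) > 1:
--       for instance_name in instance_ids[1:]:
--         instances_filter.append(
--             ' OR resource.label.instance_id = "{0:s}"'.format(instance_name))
--     instances_filter.append(')')
--
--   return ''.join(instances_filter)
-- ===== SOURCE B (Python) =====
-- from typing import List, Optional
--
--
-- def _BuildUsageFilter(
--     metric_type: str, instance_ids: Optional[List[str]]) -> str:
--   """Builds a metrics query filter based on a list of instance IDs."""
--   result = 'metric.type = "{0:s}"'.format(metric_type)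
--   if instance_ids:
--     group = ' OR '.join(
--         'resource.label.instance_id = "{0:s}"'.format(i)
--         for i in instance_ids)
--     result += ' AND (' + group + ')'
--   return result
-- ===== Notes on version B (the rewrite author's own statement) =====
-- stated objective: idiomatic
-- what changed: Replaces A's list-of-fragments accumulation with its first-element special case and [1:] loop by a single base string plus one ' OR '.join over all ids appended as ' AND (...)'.
import Mathlib
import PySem

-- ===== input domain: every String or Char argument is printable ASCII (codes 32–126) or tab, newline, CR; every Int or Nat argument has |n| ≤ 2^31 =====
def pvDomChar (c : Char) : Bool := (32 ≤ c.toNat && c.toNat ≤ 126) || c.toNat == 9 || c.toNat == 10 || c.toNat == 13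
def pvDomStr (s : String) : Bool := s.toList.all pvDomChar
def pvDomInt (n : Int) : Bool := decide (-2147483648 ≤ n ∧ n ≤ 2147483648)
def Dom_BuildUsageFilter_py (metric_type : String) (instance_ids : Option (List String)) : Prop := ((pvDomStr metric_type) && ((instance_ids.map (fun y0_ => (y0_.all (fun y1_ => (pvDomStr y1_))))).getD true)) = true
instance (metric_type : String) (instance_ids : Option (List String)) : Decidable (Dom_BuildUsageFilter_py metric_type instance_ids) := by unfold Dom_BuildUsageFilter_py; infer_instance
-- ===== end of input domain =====

-- B replaces A's fragment-list accumulation (first element special-cased, loop over ids[1:])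
-- by one base string plus a single ' OR '-join appended as ' AND (...)' — idiomatic, same cost.

-- ===== PORT A =====
-- A builds a list of string fragments and ''.joins them at the end.
def BuildUsageFilter_py (metric_type : String) (instance_ids : Option (List String)) : String :=
  let instances_filter : List String := ["metric.type = \"" ++ metric_type ++ "\""]
  let instances_filter :=
    match instance_ids with
    | some (h :: t) =>              -- `if instance_ids:` — truthy only for a non-empty list
        let instances_filter := instances_filter ++
          [" AND (resource.label.instance_id = \"" ++ h ++ "\""]
        -- for instance_name in instance_ids[1:]: append ' OR …'
        let instances_filter := t.foldl (fun acc instance_name =>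
          acc ++ [" OR resource.label.instance_id = \"" ++ instance_name ++ "\""]) instances_filter
        instances_filter ++ [")"]
    | _ => instances_filter
  PySem.Str.join "" instances_filter

-- ===== PORT B =====
def BuildUsageFilter_py_alt (metric_type : String) (instance_ids : Option (List String)) : String :=
  let result := "metric.type = \"" ++ metric_type ++ "\""
  let ids := instance_ids.getD []          -- `if instance_ids:` — falsy for None and []
  if ids.isEmpty then result
  else
    let group := PySem.Str.join " OR "
      (ids.map (fun i => "resource.label.instance_id = \"" ++ i ++ "\""))
    result ++ (" AND (" ++ group ++ ")")

-- ===== PRECONDITION & SPEC =====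
def Spec_BuildUsageFilter_py (metric_type : String) (instance_ids : Option (List String)) (out : String) : Prop := out = BuildUsageFilter_py_alt metric_type instance_ids
instance (metric_type : String) (instance_ids : Option (List String)) (out : String) : Decidable (Spec_BuildUsageFilter_py metric_type instance_ids out) := by unfold Spec_BuildUsageFilter_py; infer_instance

-- ===== CLAIM (what is proved, stated in full; the proofs are below) =====
def Claim_equal_BuildUsageFilter_py : Prop := ∀ (metric_type : String) (instance_ids : Option (List String)), Dom_BuildUsageFilter_py metric_type instance_ids → Spec_BuildUsageFilter_py metric_type instance_ids (BuildUsageFilter_py metric_type instance_ids)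

-- ===== LEMMAS AND PROOFS =====

-- A's tail loop only ever appends one fragment per id: it equals the prefix plus the mapped tail.
theorem pv_foldl_append {α β : Type} (g : α → β) (t : List α) (acc : List β) :
    t.foldl (fun acc i => acc ++ [g i]) acc = acc ++ t.map g := by
  induction t generalizing acc with
  | nil => simp
  | cons x xs ih => simp [ih]

-- intercalating the empty separator is flattening
theorem pv_intercalate_nil (l : List (List Char)) :
    List.intercalate ([] : List Char) l = l.flatten := by
  induction l with
  | nil => simp [List.intercalate]
  | cons x xs ih =>
      cases xs with
      | nil => simp [List.intercalate]
      | cons y ys =>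
          have step : List.intercalate ([] : List Char) (x :: y :: ys)
              = x ++ [] ++ List.intercalate ([] : List Char) (y :: ys) := by
            simp [List.intercalate, List.intersperse]
          rw [step, ih]; simp

-- ''.join of the fragment list, on the character level
theorem pv_join_nil_toList (l : List String) :
    (PySem.Str.join "" l).toList = (l.map String.toList).flatten := by
  simp [PySem.Str.join, PySem.Chars.join]
  exact pv_intercalate_nil _

-- B's ' OR '.join equals A's per-element ' OR …' fragments, on the character level
theorem pv_join_or (h : String) (t : List String) :
    (PySem.Str.join " OR "
      (("resource.label.instance_id = \"" ++ h ++ "\"") ::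
        t.map (fun i => "resource.label.instance_id = \"" ++ i ++ "\""))).toList
    = ("resource.label.instance_id = \"" ++ h ++ "\"").toList ++
      (t.map (fun i => (" OR resource.label.instance_id = \"" ++ i ++ "\"").toList)).flatten := by
  induction t generalizing h with
  | nil => simp [PySem.Str.join, PySem.Chars.join, List.intercalate]
  | cons x xs ih =>
      have lit : (" OR resource.label.instance_id = \"" : String).toList
          = (" OR " : String).toList ++ ("resource.label.instance_id = \"" : String).toList := by decide
      have step : ∀ (a b : List Char) (l : List (List Char)),
          List.intercalate (" OR " : String).toList (a :: b :: l)
          = a ++ (" OR " : String).toList ++ List.intercalate (" OR " : String).toList (b :: l) := by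
        intro a b l; simp [List.intercalate, List.intersperse]
      have ihx := ih x
      simp only [PySem.Str.join, PySem.Chars.join, String.toList_ofList, List.map_cons] at ihx ⊢
      rw [step, ihx]
      simp [lit, List.append_assoc, Function.comp_def, String.toList_append]

-- ===== VERDICT (by name: the statement is the Claim_ definition above) =====
theorem BuildUsageFilter_py_spec : Claim_equal_BuildUsageFilter_py := by
  intro metric_type instance_ids _
  show BuildUsageFilter_py metric_type instance_ids = BuildUsageFilter_py_alt metric_type instance_ids
  apply String.toList_injective
  unfold BuildUsageFilter_py BuildUsageFilter_py_alt
  match instance_ids with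
  | none => simp
  | some [] => simp
  | some (h :: t) =>
      have lit : (" AND (resource.label.instance_id = \"" : String).toList
          = (" AND (" : String).toList ++ ("resource.label.instance_id = \"" : String).toList := by decide
      have hor := pv_join_or h t
      simp only [Option.getD_some, List.isEmpty_cons, List.map_cons, Bool.false_eq_true,
        if_false, pv_foldl_append, pv_join_nil_toList, String.toList_append,
        List.map_nil, List.map_append, List.map_map, List.flatten_cons,
        List.flatten_append, List.flatten_nil]
      rw [hor]
      simp [lit, List.append_assoc, Function.comp_def, String.toList_append]
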